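-- pv_equiv track=rewrite | github.com/babylm-org/multilingual-babylm | src/hf_uploader.py | _compute_group_tokens
-- ===== SOURCE A (Python) =====
-- from typing import Optional, List, Dict, cast
--
-- def _compute_group_tokens(
--     tokens_per_category: Dict[str, int]
-- ) -> Dict[str, int]:
--     """Compute tokens per high-level group based on predefined mapping."""
--     padding_cats = [
--         c
--         for c in tokens_per_category
--         if c.startswith("padding") or c == "simplified-text"
--     ]
--     category_map = {
--         "Transcription": ["child-directed-speech", "child-available-speech"],
--         "Education": ["educational"],
--         "Books, Wiki, News": ["child-books", "child-wiki", "child-news"],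
--         "Subtitles": ["subtitles", "qed"],
--         "Padding": padding_cats,
--     }
--     group_tokens = {}
--     for group, cats in category_map.items():
--         group_tokens[group] = int(sum(tokens_per_category.get(c, 0) for c in cats))
--     return group_tokens
-- ===== SOURCE B (Python) =====
-- def _compute_group_tokens(tokens_per_category):
--     """Compute tokens per high-level group in one pass using a reverse category->group map."""
--     reverse = {
--         "child-directed-speech": "Transcription",
--         "child-available-speech": "Transcription",
--         "educational": "Education",
--         "child-books": "Books, Wiki, News",
--         "child-wiki": "Books, Wiki, News",
--         "child-news": "Books, Wiki, News",
--         "subtitles": "Subtitles",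
--         "qed": "Subtitles",
--     }
--     result = {
--         "Transcription": 0,
--         "Education": 0,
--         "Books, Wiki, News": 0,
--         "Subtitles": 0,
--         "Padding": 0,
--     }
--     for c, v in tokens_per_category.items():
--         if c.startswith("padding") or c == "simplified-text":
--             result["Padding"] += v
--         else:
--             g = reverse.get(c)
--             if g is not None:
--                 result[g] += v
--     return result
-- ===== Notes on version B (the rewrite author's own statement) =====
-- stated objective: alternative
-- what changed: B replaces A's per-group sums over fixed category lists (plus a pre-pass collecting padding categories) by a single pass over the input dict that classifies each category via a reverse category-to-group map and accumulates into a pre-seeded five-key result dict.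
import Mathlib
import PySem

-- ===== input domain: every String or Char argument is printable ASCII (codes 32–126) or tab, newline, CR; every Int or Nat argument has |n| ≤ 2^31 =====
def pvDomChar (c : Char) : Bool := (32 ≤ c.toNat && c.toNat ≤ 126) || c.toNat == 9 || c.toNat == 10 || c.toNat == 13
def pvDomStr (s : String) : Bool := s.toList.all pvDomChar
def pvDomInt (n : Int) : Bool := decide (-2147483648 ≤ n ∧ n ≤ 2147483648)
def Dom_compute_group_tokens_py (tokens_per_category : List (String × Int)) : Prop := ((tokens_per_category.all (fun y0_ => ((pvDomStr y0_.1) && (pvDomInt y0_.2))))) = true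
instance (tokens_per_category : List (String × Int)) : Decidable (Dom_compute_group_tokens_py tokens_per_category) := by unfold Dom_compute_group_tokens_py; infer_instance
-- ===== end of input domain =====

-- B replaces A's per-group scans over fixed category lists by one pass over the input with a
-- reverse category→group map (a different decomposition; same asymptotic cost).

-- ===== PORT A =====
def compute_group_tokens_py (tokens_per_category : List (String × Int)) : List (String × Int) :=
  let d : PySem.Dict String Int := PySem.Dict.mk tokens_per_category
  let padding_cats : List String :=
    (tokens_per_category.map Prod.fst).filter
      (fun c => PySem.Str.startswith c "padding" || c == "simplified-text")
  let category_map : List (String × List String) :=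
    [("Transcription", ["child-directed-speech", "child-available-speech"]),
     ("Education", ["educational"]),
     ("Books, Wiki, News", ["child-books", "child-wiki", "child-news"]),
     ("Subtitles", ["subtitles", "qed"]),
     ("Padding", padding_cats)]
  (category_map.foldl
    (fun gt p => gt.insert p.1 (p.2.foldl (fun s c => s + d.getD c 0) 0))
    PySem.Dict.empty).items

-- ===== PORT B =====
def compute_group_tokens_py_alt (tokens_per_category : List (String × Int)) : List (String × Int) :=
  -- 'reverse' is the fixed category -> group dict of Source B, written inline
  (tokens_per_category.foldl
    (fun res p =>
      if PySem.Str.startswith p.1 "padding" || p.1 == "simplified-text" then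
        res.insert "Padding" (res.getD "Padding" 0 + p.2)
      else
        match (PySem.Dict.mk
          [("child-directed-speech", "Transcription"),
           ("child-available-speech", "Transcription"),
           ("educational", "Education"),
           ("child-books", "Books, Wiki, News"),
           ("child-wiki", "Books, Wiki, News"),
           ("child-news", "Books, Wiki, News"),
           ("subtitles", "Subtitles"),
           ("qed", "Subtitles")]).get? p.1 with
        | some g => res.insert g (res.getD g 0 + p.2)
        | none => res)
    (PySem.Dict.mk
      [("Transcription", 0), ("Education", 0), ("Books, Wiki, News", 0),
       ("Subtitles", 0), ("Padding", 0)])).items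

-- ===== PRECONDITION & SPEC =====
-- Pre_ excludes association lists with duplicate keys: the Python argument is a dict, whose keys
-- are necessarily distinct, so such lists correspond to no Python input.
def Pre_compute_group_tokens_py (tokens_per_category : List (String × Int)) : Prop :=
  (tokens_per_category.map Prod.fst).Nodup
instance (tokens_per_category : List (String × Int)) : Decidable (Pre_compute_group_tokens_py tokens_per_category) := by unfold Pre_compute_group_tokens_py; infer_instance
def pvWitness_compute_group_tokens_py : (List (String × Int)) :=
  [("educational", 5), ("padding-extra", 2), ("qed", 3)]

def Spec_compute_group_tokens_py (tokens_per_category : List (String × Int)) (out : List (String × Int)) : Prop := out = compute_group_tokens_py_alt tokens_per_category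
instance (tokens_per_category : List (String × Int)) (out : List (String × Int)) : Decidable (Spec_compute_group_tokens_py tokens_per_category out) := by unfold Spec_compute_group_tokens_py; infer_instance

-- ===== CLAIM (what is proved, stated in full; the proofs are below) =====
def Claim_equal_compute_group_tokens_py : Prop := ∀ (tokens_per_category : List (String × Int)), Dom_compute_group_tokens_py tokens_per_category → Pre_compute_group_tokens_py tokens_per_category → Spec_compute_group_tokens_py tokens_per_category (compute_group_tokens_py tokens_per_category)

-- ===== LEMMAS AND PROOFS =====

-- the padding predicate both programs test
def pvPad (c : String) : Bool := PySem.Str.startswith c "padding" || c == "simplified-text"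

-- d.get(c, 0) on the input dict
def pvG (tpc : List (String × Int)) (c : String) : Int := (PySem.Dict.mk tpc).getD c 0

-- sum of the values of the entries whose key lies in cs
def ctrC (cs : List String) : List (String × Int) → Int
  | [] => 0
  | (k, v) :: r => (if k ∈ cs then v else 0) + ctrC cs r

-- sum of the values of the padding entries
def ctrP : List (String × Int) → Int
  | [] => 0
  | (k, v) :: r => (if pvPad k then v else 0) + ctrP r

theorem getD_not_mem (l : List (String × Int)) (k : String) (h : k ∉ l.map Prod.fst) :
    pvG l k = 0 := by
  induction l with
  | nil => simp [pvG, PySem.Dict.getD, PySem.Dict.get?]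
  | cons p r ih =>
    obtain ⟨a, b⟩ := p
    simp only [List.map_cons, List.mem_cons, not_or] at h
    have := ih h.2
    simp only [pvG, PySem.Dict.getD, PySem.Dict.get?_mk_cons] at this ⊢
    rw [if_neg (by simp [Ne.symm h.1])]
    exact this

theorem getD_cons (a : String) (b : Int) (r : List (String × Int)) (c : String) :
    pvG ((a, b) :: r) c = if a = c then b else pvG r c := by
  by_cases hc : a = c
  · simp [pvG, PySem.Dict.getD, PySem.Dict.get?_mk_cons, hc]
  · simp [pvG, PySem.Dict.getD, PySem.Dict.get?_mk_cons, hc]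

theorem sum_if (cs : List String) (hnd : cs.Nodup) (f : String → Int) (a : String) (b : Int) :
    ((cs.map (fun c => if a = c then b else f c)).sum : Int) =
      (if a ∈ cs then b - f a else 0) + (cs.map f).sum := by
  induction cs with
  | nil => simp
  | cons c cs' ih =>
    simp only [List.nodup_cons] at hnd
    by_cases hac : a = c
    · subst hac
      have : cs'.map (fun c => if a = c then b else f c) = cs'.map f :=
        List.map_congr_left (fun x hx => if_neg (fun he => hnd.1 (by rw [he]; exact hx)))
      simp [this]
      omega
    · simp only [List.map_cons, List.sum_cons, if_neg hac, ih hnd.2, List.mem_cons]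
      simp [hac]
      split_ifs <;> omega

-- A's per-group sum over a fixed nodup category list equals the one-pass contribution
theorem sum_eq (cs : List String) (hnd : cs.Nodup) :
    ∀ tpc : List (String × Int), (tpc.map Prod.fst).Nodup →
      ((cs.map (pvG tpc)).sum : Int) = ctrC cs tpc := by
  intro tpc
  induction tpc with
  | nil =>
    intro _
    have : cs.map (pvG []) = cs.map (fun _ => (0 : Int)) :=
      List.map_congr_left (fun x _ => by simp [pvG, PySem.Dict.getD, PySem.Dict.get?])
    simp [this, ctrC]
  | cons p r ih =>
    obtain ⟨a, b⟩ := p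
    intro h
    simp only [List.map_cons, List.nodup_cons] at h
    have h1 : cs.map (pvG ((a, b) :: r)) = cs.map (fun c => if a = c then b else pvG r c) :=
      List.map_congr_left (fun x _ => getD_cons a b r x)
    rw [h1, sum_if cs hnd (pvG r) a b, getD_not_mem r a h.1, ih h.2]
    simp only [ctrC]
    have : a ∈ cs ↔ ∃ c ∈ cs, a = c := by
      constructor
      · exact fun hm => ⟨a, hm, rfl⟩
      · rintro ⟨c, hc, rfl⟩; exact hc
    split_ifs with hmem <;> omega

-- A's Padding sum equals the one-pass padding contribution
theorem sum_pad : ∀ tpc : List (String × Int), (tpc.map Prod.fst).Nodup →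
    ((((tpc.map Prod.fst).filter (fun c => pvPad c)).map (pvG tpc)).sum : Int) = ctrP tpc := by
  intro tpc
  induction tpc with
  | nil => intro _; simp [ctrP]
  | cons p r ih =>
    obtain ⟨a, b⟩ := p
    intro h
    simp only [List.map_cons, List.nodup_cons] at h
    have hcongr : ((r.map Prod.fst).filter (fun c => pvPad c)).map (pvG ((a, b) :: r)) =
        ((r.map Prod.fst).filter (fun c => pvPad c)).map (pvG r) := by
      refine List.map_congr_left (fun x hx => ?_)
      rw [getD_cons, if_neg]
      intro he
      exact h.1 (he ▸ (List.mem_filter.mp hx).1)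
    by_cases hp : pvPad a
    · simp only [List.map_cons, List.filter_cons, hp, if_pos, List.sum_cons,
        List.map_cons, hcongr, ih h.2, ctrP]
      rw [getD_cons, if_pos rfl]
    · simp only [List.map_cons, List.filter_cons, hp, Bool.false_eq_true, if_false]
      rw [hcongr, ih h.2]
      simp [ctrP, hp]

-- A's port, written as an explicit five-entry list
theorem a_shape (tpc : List (String × Int)) :
    compute_group_tokens_py tpc =
      [("Transcription", 0 + pvG tpc "child-directed-speech" + pvG tpc "child-available-speech"),
       ("Education", 0 + pvG tpc "educational"),
       ("Books, Wiki, News", 0 + pvG tpc "child-books" + pvG tpc "child-wiki" + pvG tpc "child-news"),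
       ("Subtitles", 0 + pvG tpc "subtitles" + pvG tpc "qed"),
       ("Padding", ((tpc.map Prod.fst).filter (fun c => pvPad c)).foldl (fun s c => s + pvG tpc c) 0)] := by
  simp [compute_group_tokens_py, pvG, pvPad, PySem.Dict.insert, PySem.Dict.empty,
        PySem.Dict.getD, PySem.Dict.contains]

-- one non-padding step of B's loop on the five-entry accumulator
theorem b_step (k : String) (v x1 x2 x3 x4 x5 : Int) (hp : ¬ pvPad k = true) :
    (match (PySem.Dict.mk
            [("child-directed-speech", "Transcription"),
             ("child-available-speech", "Transcription"),
             ("educational", "Education"),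
             ("child-books", "Books, Wiki, News"),
             ("child-wiki", "Books, Wiki, News"),
             ("child-news", "Books, Wiki, News"),
             ("subtitles", "Subtitles"),
             ("qed", "Subtitles")]).get? k with
          | some g => (PySem.Dict.mk
        [("Transcription", x1), ("Education", x2), ("Books, Wiki, News", x3),
         ("Subtitles", x4), ("Padding", x5)]).insert g ((PySem.Dict.mk
        [("Transcription", x1), ("Education", x2), ("Books, Wiki, News", x3),
         ("Subtitles", x4), ("Padding", x5)]).getD g 0 + v)
          | none => (PySem.Dict.mk
        [("Transcription", x1), ("Education", x2), ("Books, Wiki, News", x3),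
         ("Subtitles", x4), ("Padding", x5)])) =
    PySem.Dict.mk
        [("Transcription", x1 + (if k = "child-directed-speech" ∨ k = "child-available-speech" then v else 0)),
         ("Education", x2 + (if k = "educational" then v else 0)),
         ("Books, Wiki, News", x3 + (if k = "child-books" ∨ k = "child-wiki" ∨ k = "child-news" then v else 0)),
         ("Subtitles", x4 + (if k = "subtitles" ∨ k = "qed" then v else 0)),
         ("Padding", x5 + (if pvPad k then v else 0))] := by
  by_cases h0 : k = "child-directed-speech"
  · subst h0; simp [PySem.Dict.insert, PySem.Dict.getD, PySem.Dict.get?_mk_cons, hp]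
  by_cases h1 : k = "child-available-speech"
  · subst h1; simp [PySem.Dict.insert, PySem.Dict.getD, PySem.Dict.get?_mk_cons, hp]
  by_cases h2 : k = "educational"
  · subst h2; simp [PySem.Dict.insert, PySem.Dict.getD, PySem.Dict.get?_mk_cons, hp]
  by_cases h3 : k = "child-books"
  · subst h3; simp [PySem.Dict.insert, PySem.Dict.getD, PySem.Dict.get?_mk_cons, hp]
  by_cases h4 : k = "child-wiki"
  · subst h4; simp [PySem.Dict.insert, PySem.Dict.getD, PySem.Dict.get?_mk_cons, hp]
  by_cases h5 : k = "child-news"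
  · subst h5; simp [PySem.Dict.insert, PySem.Dict.getD, PySem.Dict.get?_mk_cons, hp]
  by_cases h6 : k = "subtitles"
  · subst h6; simp [PySem.Dict.insert, PySem.Dict.getD, PySem.Dict.get?_mk_cons, hp]
  by_cases h7 : k = "qed"
  · subst h7; simp [PySem.Dict.insert, PySem.Dict.getD, PySem.Dict.get?_mk_cons, hp]
  simp [PySem.Dict.get?, Ne.symm h0, Ne.symm h1, Ne.symm h2, Ne.symm h3,
        Ne.symm h4, Ne.symm h5, Ne.symm h6, Ne.symm h7,
        h0, h1, h2, h3, h4, h5, h6, h7, hp]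

-- B's fold from an arbitrary five-value seed
theorem b_inv (tpc : List (String × Int)) :
    ∀ x1 x2 x3 x4 x5 : Int,
    (tpc.foldl
      (fun res p =>
        if PySem.Str.startswith p.1 "padding" || p.1 == "simplified-text" then
          res.insert "Padding" (res.getD "Padding" 0 + p.2)
        else
          match (PySem.Dict.mk
            [("child-directed-speech", "Transcription"),
             ("child-available-speech", "Transcription"),
             ("educational", "Education"),
             ("child-books", "Books, Wiki, News"),
             ("child-wiki", "Books, Wiki, News"),
             ("child-news", "Books, Wiki, News"),
             ("subtitles", "Subtitles"),
             ("qed", "Subtitles")]).get? p.1 with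
          | some g => res.insert g (res.getD g 0 + p.2)
          | none => res)
      (PySem.Dict.mk
        [("Transcription", x1), ("Education", x2), ("Books, Wiki, News", x3),
         ("Subtitles", x4), ("Padding", x5)])) =
    PySem.Dict.mk
      [("Transcription", x1 + ctrC ["child-directed-speech", "child-available-speech"] tpc),
       ("Education", x2 + ctrC ["educational"] tpc),
       ("Books, Wiki, News", x3 + ctrC ["child-books", "child-wiki", "child-news"] tpc),
       ("Subtitles", x4 + ctrC ["subtitles", "qed"] tpc),
       ("Padding", x5 + ctrP tpc)] := by
  induction tpc with
  | nil => intro x1 x2 x3 x4 x5; simp [ctrC, ctrP]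
  | cons p r ih =>
    obtain ⟨k, v⟩ := p
    intro x1 x2 x3 x4 x5
    simp only [List.foldl_cons]
    by_cases hp : pvPad k
    · have hne : ¬(k = "child-directed-speech" ∨ k = "child-available-speech") ∧
        ¬(k = "educational") ∧
        ¬(k = "child-books" ∨ k = "child-wiki" ∨ k = "child-news") ∧
        ¬(k = "subtitles" ∨ k = "qed") := by
        refine ⟨?_, ?_, ?_, ?_⟩ <;>
          first
          | (rintro (rfl | rfl) <;> revert hp <;> decide)
          | (rintro (rfl | rfl | rfl) <;> revert hp <;> decide)
      have hp' : (PySem.Str.startswith k "padding" || k == "simplified-text") = true := hp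
      rw [if_pos hp']
      have hstep : (PySem.Dict.mk
        [("Transcription", x1), ("Education", x2), ("Books, Wiki, News", x3),
         ("Subtitles", x4), ("Padding", x5)]).insert "Padding"
          ((PySem.Dict.mk
        [("Transcription", x1), ("Education", x2), ("Books, Wiki, News", x3),
         ("Subtitles", x4), ("Padding", x5)]).getD "Padding" 0 + v) =
        PySem.Dict.mk
        [("Transcription", x1), ("Education", x2), ("Books, Wiki, News", x3),
         ("Subtitles", x4), ("Padding", x5 + v)] := by
        simp [PySem.Dict.insert, PySem.Dict.getD, PySem.Dict.get?_mk_cons]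
      rw [hstep, ih]
      simp [ctrC, ctrP, hp, hne.1, hne.2.1, hne.2.2.1, hne.2.2.2]
      omega
    · have hp' : ¬ (PySem.Str.startswith k "padding" || k == "simplified-text") = true := hp
      rw [if_neg hp', b_step k v x1 x2 x3 x4 x5 hp, ih]
      simp only [ctrC, ctrP, List.mem_cons, List.not_mem_nil, or_false, PySem.Dict.mk.injEq,
        List.cons.injEq, Prod.mk.injEq, and_true, true_and]
      refine ⟨by split_ifs <;> omega, by split_ifs <;> omega, by split_ifs <;> omega,
        by split_ifs <;> omega, by simp [hp]⟩

theorem b_eq (tpc : List (String × Int)) :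
    compute_group_tokens_py_alt tpc =
      [("Transcription", ctrC ["child-directed-speech", "child-available-speech"] tpc),
       ("Education", ctrC ["educational"] tpc),
       ("Books, Wiki, News", ctrC ["child-books", "child-wiki", "child-news"] tpc),
       ("Subtitles", ctrC ["subtitles", "qed"] tpc),
       ("Padding", ctrP tpc)] := by
  unfold compute_group_tokens_py_alt
  rw [b_inv tpc 0 0 0 0 0]
  simp

theorem a_eq (tpc : List (String × Int)) (h : (tpc.map Prod.fst).Nodup) :
    compute_group_tokens_py tpc =
      [("Transcription", ctrC ["child-directed-speech", "child-available-speech"] tpc),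
       ("Education", ctrC ["educational"] tpc),
       ("Books, Wiki, News", ctrC ["child-books", "child-wiki", "child-news"] tpc),
       ("Subtitles", ctrC ["subtitles", "qed"] tpc),
       ("Padding", ctrP tpc)] := by
  rw [a_shape tpc]
  rw [PySem.List.foldl_add (g := pvG tpc)]
  rw [sum_pad tpc h]
  have h1 := sum_eq ["child-directed-speech", "child-available-speech"] (by decide) tpc h
  have h2 := sum_eq ["educational"] (by decide) tpc h
  have h3 := sum_eq ["child-books", "child-wiki", "child-news"] (by decide) tpc h
  have h4 := sum_eq ["subtitles", "qed"] (by decide) tpc h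
  simp only [List.map_cons, List.map_nil, List.sum_cons, List.sum_nil] at h1 h2 h3 h4
  simp only [List.cons.injEq, Prod.mk.injEq, and_true, true_and]
  refine ⟨by omega, by omega, by omega, by omega, by omega⟩

-- ===== VERDICT (by name: the statement is the Claim_ definition above) =====
theorem compute_group_tokens_py_spec : Claim_equal_compute_group_tokens_py := by
  intro tpc _ hpre
  unfold Spec_compute_group_tokens_py
  rw [a_eq tpc hpre, b_eq tpc]
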